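-- pv_equiv track=rewrite | github.com/Gabbro29/Bioinformatics | genome_seq/Codes/PathGraph.py | OverlapGraphs
-- ===== SOURCE A (Python) =====
-- def Preffix(pattern):
--     return pattern[0:len(pattern)-1]
--
-- def Suffix(pattern):
--     return pattern[1:len(pattern)]
--
-- def OverlapGraphs(patterns):
--     graph=[]
--     for elem in patterns:
--         relation=[elem]
--         nto=[]
--         for elem2 in patterns:
--             if elem != elem2 and Suffix(elem)==Preffix(elem2):
--                 nto.append(elem2)
--         conections=",".join(nto)
--         relation.append(conections)
--         if len(nto)!=0:
--             graph.append(" -> ".join(relation))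
--
--     return graph
-- ===== SOURCE B (Python) =====
-- def OverlapGraphs(patterns):
--     index = {}
--     for p in patterns:
--         index.setdefault(p[:-1], []).append(p)
--     graph = []
--     for elem in patterns:
--         nto = [q for q in index.get(elem[1:], []) if q != elem]
--         if nto:
--             graph.append(" -> ".join([elem, ",".join(nto)]))
--     return graph
-- ===== Notes on version B (the rewrite author's own statement) =====
-- stated objective: faster
-- what changed: Replaces the quadratic all-pairs suffix/prefix scan with a one-pass dict grouping patterns by their prefix, then a single lookup of each pattern's suffix with a self-filter.
import Mathlib
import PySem

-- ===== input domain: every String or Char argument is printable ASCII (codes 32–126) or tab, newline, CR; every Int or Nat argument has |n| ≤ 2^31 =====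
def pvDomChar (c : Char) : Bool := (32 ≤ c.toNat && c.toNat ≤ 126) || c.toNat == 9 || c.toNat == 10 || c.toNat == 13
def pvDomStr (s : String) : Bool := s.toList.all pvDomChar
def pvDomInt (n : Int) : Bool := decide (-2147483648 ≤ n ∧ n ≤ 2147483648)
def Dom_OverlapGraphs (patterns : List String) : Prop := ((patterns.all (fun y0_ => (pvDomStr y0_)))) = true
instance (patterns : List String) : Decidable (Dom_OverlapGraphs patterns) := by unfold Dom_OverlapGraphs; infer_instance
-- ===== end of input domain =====

-- B replaces A's quadratic all-pairs suffix/prefix scan by a dict keyed on each pattern's prefix,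
-- built in one pass, then a single lookup per pattern (objective: faster).

-- ===== PORT A =====
def Preffix (pattern : String) : String :=
  PySem.Str.slice pattern (some 0) (some (PySem.Str.len pattern - 1))

def Suffix (pattern : String) : String :=
  PySem.Str.slice pattern (some 1) (some (PySem.Str.len pattern))

def OverlapGraphs (patterns : List String) : List String :=
  patterns.foldl (fun graph elem =>
    let relation := [elem]
    let nto := patterns.foldl (fun nto elem2 =>
      if elem ≠ elem2 ∧ Suffix elem = Preffix elem2 then nto ++ [elem2] else nto) []
    let conections := PySem.Str.join "," nto
    let relation := relation ++ [conections]
    if nto.length ≠ 0 then graph ++ [PySem.Str.join " -> " relation] else graph) []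

-- ===== PORT B =====
-- p[:-1] and p[1:] as written in Source B
def prefB (p : String) : String := PySem.Str.slice p none (some (-1))
def suffB (p : String) : String := PySem.Str.slice p (some 1) none

def OverlapGraphs_alt (patterns : List String) : List String :=
  -- index.setdefault(p[:-1], []).append(p): d[k] becomes d.get(k, []) + [p], exactly Dict.modify
  let index : PySem.Dict String (List String) :=
    patterns.foldl (fun d p => d.modify (prefB p) [] (· ++ [p])) PySem.Dict.empty
  patterns.foldl (fun graph elem =>
    let nto := (index.getD (suffB elem) []).filter (fun q => q ≠ elem)
    if nto ≠ [] then graph ++ [PySem.Str.join " -> " [elem, PySem.Str.join "," nto]] else graph) []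

-- ===== PRECONDITION & SPEC =====
def Spec_OverlapGraphs (patterns : List String) (out : List String) : Prop := out = OverlapGraphs_alt patterns
instance (patterns : List String) (out : List String) : Decidable (Spec_OverlapGraphs patterns out) := by unfold Spec_OverlapGraphs; infer_instance

-- ===== CLAIM (what is proved, stated in full; the proofs are below) =====
def Claim_equal_OverlapGraphs : Prop := ∀ (patterns : List String), Dom_OverlapGraphs patterns → Spec_OverlapGraphs patterns (OverlapGraphs patterns)

-- ===== LEMMAS AND PROOFS =====

-- A's pattern[0:len-1] is B's pattern[:-1]
theorem prefB_eq (p : String) : Preffix p = prefB p := by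
  simp only [Preffix, prefB, PySem.Str.slice, PySem.Str.len, PySem.Chars.slice_eq_listSlice]
  congr 1
  generalize p.toList = l
  simp only [PySem.List.slice, PySem.List.clampIdx]
  split_ifs <;> first | rfl | omega | (congr 1 <;> first | rfl | omega)

-- A's pattern[1:len] is B's pattern[1:]
theorem suffB_eq (p : String) : Suffix p = suffB p := by
  simp only [Suffix, suffB, PySem.Str.slice, PySem.Str.len, PySem.Chars.slice_eq_listSlice]
  congr 1
  generalize p.toList = l
  simp only [PySem.List.slice, PySem.List.clampIdx]
  split_ifs <;> first | rfl | omega | (congr 1 <;> first | rfl | omega)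

-- B's grouping dict: looking up c yields exactly the patterns whose prefix is c, in input order
theorem index_getD (patterns : List String) (c : String) :
    ((patterns.foldl (fun d p => d.modify (prefB p) [] (· ++ [p])) PySem.Dict.empty).getD c [])
      = patterns.filter (fun p => prefB p == c) := by
  have h : patterns.foldl (fun d p => d.modify (prefB p) [] (· ++ [p])) PySem.Dict.empty
      = (patterns.map (fun p => (prefB p, p))).foldl (fun d q => d.modify q.1 [] (· ++ [q.2])) PySem.Dict.empty := by
    rw [List.foldl_map]
  rw [h, PySem.Dict.getD_foldl_modify_append]
  simp [List.filter_map, Function.comp_def]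

-- A's inner loop over all patterns equals B's filtered dict lookup
theorem nto_eq (patterns : List String) (elem : String) :
    patterns.foldl (fun nto elem2 =>
      if elem ≠ elem2 ∧ Suffix elem = Preffix elem2 then nto ++ [elem2] else nto) []
    = ((patterns.foldl (fun d p => d.modify (prefB p) [] (· ++ [p])) PySem.Dict.empty).getD
        (suffB elem) []).filter (fun q => q ≠ elem) := by
  rw [PySem.List.foldl_append_ite_eq_filter, index_getD, List.filter_filter]
  simp only [List.nil_append]
  apply List.filter_congr
  intro x _
  rw [prefB_eq x, suffB_eq elem]
  by_cases h1 : x = elem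
  · subst h1; simp
  · by_cases h2 : prefB x = suffB elem
    · have h1' : elem ≠ x := fun h => h1 h.symm
      simpa [h1', ← h2] using h1
    · have h3 : suffB elem ≠ prefB x := fun h => h2 h.symm
      simp [h1, h2, h3]

theorem OverlapGraphs_eq_alt (patterns : List String) :
    OverlapGraphs patterns = OverlapGraphs_alt patterns := by
  simp only [OverlapGraphs, OverlapGraphs_alt]
  apply PySem.List.foldl_congr_mem
  intro graph elem _
  rw [nto_eq patterns elem]
  generalize ((patterns.foldl (fun d p => d.modify (prefB p) [] (· ++ [p])) PySem.Dict.empty).getD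
        (suffB elem) []).filter (fun q => q ≠ elem) = n
  simp [List.length_eq_zero_iff]

-- ===== VERDICT (by name: the statement is the Claim_ definition above) =====
theorem OverlapGraphs_spec : Claim_equal_OverlapGraphs := by
  intro patterns _
  exact OverlapGraphs_eq_alt patterns
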